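-- pv_equiv track=rewrite | github.com/StudentUAb/EfolioB-IIA | efolioB.py | find_exit_doors
-- ===== SOURCE A (Python) =====
-- def find_exit_doors(mapa):
--     exit_doors = []
--     for i in range(len(mapa)):
--         for j in range(len(mapa[0])):
--             if mapa[i][j] == 1:
--                 if (i == 0 or i == len(mapa) - 1 or j == 0 or j == len(mapa[0]) - 1):
--                     exit_doors.append((i, j))
--     return exit_doors
-- ===== SOURCE B (Python) =====
-- def find_exit_doors(mapa):
--     # Visit only the perimeter cells, in the same row-major order as a full scan.
--     if not mapa or not mapa[0]:
--         return []
--     n, w = len(mapa), len(mapa[0])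
--     doors = [(0, j) for j, v in enumerate(mapa[0]) if v == 1]
--     if n > 1:
--         for i in range(1, n - 1):
--             row = mapa[i]
--             if row[0] == 1:
--                 doors.append((i, 0))
--             if w > 1 and row[w - 1] == 1:
--                 doors.append((i, w - 1))
--         doors += [(n - 1, j) for j, v in enumerate(mapa[-1][:w]) if v == 1]
--     return doors
-- ===== Notes on version B (the rewrite author's own statement) =====
-- stated objective: faster
-- what changed: B visits only the perimeter cells (whole first row, the two side columns of the middle rows, whole last row) in the same row-major order, instead of A's full scan of every cell with a border test.
import Mathlib
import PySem

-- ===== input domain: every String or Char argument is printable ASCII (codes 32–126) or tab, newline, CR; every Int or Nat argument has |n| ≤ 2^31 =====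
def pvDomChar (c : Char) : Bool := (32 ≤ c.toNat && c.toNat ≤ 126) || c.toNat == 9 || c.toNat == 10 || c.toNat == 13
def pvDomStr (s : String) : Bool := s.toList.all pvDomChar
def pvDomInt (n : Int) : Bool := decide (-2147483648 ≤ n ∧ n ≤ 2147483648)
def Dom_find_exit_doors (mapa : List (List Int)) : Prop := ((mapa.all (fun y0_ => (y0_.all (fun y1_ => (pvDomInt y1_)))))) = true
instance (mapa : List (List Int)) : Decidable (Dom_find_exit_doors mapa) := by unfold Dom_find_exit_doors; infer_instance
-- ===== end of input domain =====

-- B walks only the perimeter cells (top row, side columns, bottom row) in the same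
-- row-major order as A's full scan: O(n+m) instead of O(n*m).

-- ===== PORT A =====
def find_exit_doors (mapa : List (List Int)) : List (Int × Int) :=
  let n : Int := mapa.length
  let w : Int := (PySem.List.pyGetD mapa 0 []).length
  (PySem.List.pyRange 0 n 1).foldl (fun acc i =>
    (PySem.List.pyRange 0 w 1).foldl (fun acc j =>
      if PySem.List.pyGetD (PySem.List.pyGetD mapa i []) j 0 = 1 then
        if i = 0 ∨ i = n - 1 ∨ j = 0 ∨ j = w - 1 then acc ++ [(i, j)] else acc
      else acc) acc) []

-- ===== PORT B =====
def find_exit_doors_alt (mapa : List (List Int)) : List (Int × Int) :=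
  match mapa with
  | [] => []
  | row0 :: _ =>
    if row0 = [] then [] else
    let n : Int := mapa.length
    let w : Int := row0.length
    let doors : List (Int × Int) :=
      ((PySem.List.enumerate row0 0).filter (fun p => p.2 == 1)).map (fun p => ((0 : Int), p.1))
    if 1 < n then
      let doors := (PySem.List.pyRange 1 (n - 1) 1).foldl (fun acc i =>
        let row := PySem.List.pyGetD mapa i []
        let acc := if PySem.List.pyGetD row 0 0 = 1 then acc ++ [(i, (0 : Int))] else acc
        if 1 < w ∧ PySem.List.pyGetD row (w - 1) 0 = 1 then acc ++ [(i, w - 1)] else acc) doors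
      doors ++
        ((PySem.List.enumerate (PySem.List.slice (PySem.List.pyGetD mapa (-1) []) none (some w)) 0).filter
            (fun p => p.2 == 1)).map (fun p => (n - 1, p.1))
    else doors

-- ===== PRECONDITION & SPEC =====
-- Pre_ excludes exactly the inputs where A raises IndexError: non-empty maps with some
-- row shorter than the first row (A indexes every row at columns 0..len(mapa[0])-1).
def Pre_find_exit_doors (mapa : List (List Int)) : Prop :=
  ∀ row ∈ mapa, (mapa.headD []).length ≤ row.length
instance (mapa : List (List Int)) : Decidable (Pre_find_exit_doors mapa) := by
  unfold Pre_find_exit_doors; infer_instance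
def pvWitness_find_exit_doors : List (List Int) := [[1, 0], [0, 1]]

def Spec_find_exit_doors (mapa : List (List Int)) (out : List (Int × Int)) : Prop := out = find_exit_doors_alt mapa
instance (mapa : List (List Int)) (out : List (Int × Int)) : Decidable (Spec_find_exit_doors mapa out) := by unfold Spec_find_exit_doors; infer_instance

-- ===== CLAIM (what is proved, stated in full; the proofs are below) =====
def Claim_equal_find_exit_doors : Prop := ∀ (mapa : List (List Int)), Dom_find_exit_doors mapa → Pre_find_exit_doors mapa → Spec_find_exit_doors mapa (find_exit_doors mapa)

-- ===== LEMMAS AND PROOFS =====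

def pvVal (mapa : List (List Int)) (i j : Int) : Int :=
  PySem.List.pyGetD (PySem.List.pyGetD mapa i []) j 0

def pvP (mapa : List (List Int)) (n w i j : Int) : Bool :=
  decide (pvVal mapa i j = 1) && decide (i = 0 ∨ i = n - 1 ∨ j = 0 ∨ j = w - 1)

def pvG (mapa : List (List Int)) (n w i : Int) : List (Int × Int) :=
  ((PySem.List.pyRange 0 w 1).filter (pvP mapa n w i)).map (fun j => (i, j))

theorem A_flatMap (mapa : List (List Int)) :
    (let n : Int := mapa.length
     let w : Int := (PySem.List.pyGetD mapa 0 []).length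
     (PySem.List.pyRange 0 n 1).foldl (fun acc i =>
       (PySem.List.pyRange 0 w 1).foldl (fun acc j =>
         if PySem.List.pyGetD (PySem.List.pyGetD mapa i []) j 0 = 1 then
           if i = 0 ∨ i = n - 1 ∨ j = 0 ∨ j = w - 1 then acc ++ [(i, j)] else acc
         else acc) acc) [])
    = (PySem.List.pyRange 0 (mapa.length : Int) 1).flatMap
        (pvG mapa mapa.length (PySem.List.pyGetD mapa 0 []).length) := by
  set n : Int := (mapa.length : Int) with hn
  set w : Int := ((PySem.List.pyGetD mapa 0 []).length : Int) with hw
  have hin : ∀ i : Int, (fun (acc : List (Int × Int)) j =>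
      if PySem.List.pyGetD (PySem.List.pyGetD mapa i []) j 0 = 1 then
        if i = 0 ∨ i = n - 1 ∨ j = 0 ∨ j = w - 1 then acc ++ [(i, j)] else acc
      else acc) = (fun acc j => if pvP mapa n w i j then acc ++ [(i, j)] else acc) := by
    intro i; funext acc j
    by_cases h1 : PySem.List.pyGetD (PySem.List.pyGetD mapa i []) j 0 = 1 <;>
      by_cases h2 : i = 0 ∨ i = n - 1 ∨ j = 0 ∨ j = w - 1 <;>
      simp [pvP, pvVal, h1, h2]
  have : (fun (acc : List (Int × Int)) i =>
      (PySem.List.pyRange 0 w 1).foldl (fun acc j =>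
        if PySem.List.pyGetD (PySem.List.pyGetD mapa i []) j 0 = 1 then
          if i = 0 ∨ i = n - 1 ∨ j = 0 ∨ j = w - 1 then acc ++ [(i, j)] else acc
        else acc) acc) = (fun acc i => acc ++ pvG mapa n w i) := by
    funext acc i
    rw [hin i, PySem.List.foldl_append_if]
    rfl
  show (PySem.List.pyRange 0 n 1).foldl _ [] = _
  rw [this, PySem.List.foldl_append_eq_flatMap]
  simp

-- B's comprehension over a row equals A's filtered index range over that row.
theorem comp_eq (row : List Int) (c : Int) :
    ((PySem.List.enumerate row 0).filter (fun p => p.2 == 1)).map (fun p => (c, p.1))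
    = ((PySem.List.pyRange 0 (row.length : Int) 1).filter
        (fun j => decide (PySem.List.pyGetD row j 0 = 1))).map (fun j => (c, j)) := by
  rw [PySem.List.enumerate_eq_map_pyRange (d := 0), List.filter_map, List.map_map]
  simp only [Function.comp_def]
  congr 1

def pvH (mapa : List (List Int)) (w i : Int) : List (Int × Int) :=
  (if PySem.List.pyGetD (PySem.List.pyGetD mapa i []) 0 0 = 1 then [(i, (0 : Int))] else []) ++
  (if 1 < w ∧ PySem.List.pyGetD (PySem.List.pyGetD mapa i []) (w - 1) 0 = 1 then [(i, w - 1)] else [])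

-- B's middle loop in flatMap form
theorem B_mid (mapa : List (List Int)) (n w : Int) (doors : List (Int × Int)) :
    (PySem.List.pyRange 1 (n - 1) 1).foldl (fun acc i =>
      let row := PySem.List.pyGetD mapa i []
      let acc := if PySem.List.pyGetD row 0 0 = 1 then acc ++ [(i, (0 : Int))] else acc
      if 1 < w ∧ PySem.List.pyGetD row (w - 1) 0 = 1 then acc ++ [(i, w - 1)] else acc) doors
    = doors ++ (PySem.List.pyRange 1 (n - 1) 1).flatMap (pvH mapa w) := by
  have : (fun (acc : List (Int × Int)) i =>
      let row := PySem.List.pyGetD mapa i []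
      let acc := if PySem.List.pyGetD row 0 0 = 1 then acc ++ [(i, (0 : Int))] else acc
      if 1 < w ∧ PySem.List.pyGetD row (w - 1) 0 = 1 then acc ++ [(i, w - 1)] else acc)
      = (fun acc i => acc ++ pvH mapa w i) := by
    funext acc i
    simp only [pvH]
    split_ifs <;> simp
  rw [this, PySem.List.foldl_append_eq_flatMap]

-- row 0 of A's scan: border condition is vacuous
theorem g_zero (row0 : List Int) (rest : List (List Int)) (n w : Int) :
    pvG (row0 :: rest) n w 0
    = ((PySem.List.pyRange 0 w 1).filter (fun j => decide (PySem.List.pyGetD row0 j 0 = 1))).map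
        (fun j => ((0 : Int), j)) := by
  unfold pvG
  congr 1
  apply List.filter_congr
  intro j _
  simp [pvP, pvVal, PySem.List.pyGetD_zero_cons]

theorem g_mid (mapa : List (List Int)) (n w i : Int) (hw : 1 ≤ w)
    (hi0 : i ≠ 0) (hin : i ≠ n - 1) :
    pvG mapa n w i = pvH mapa w i := by
  have hpred : ∀ j ∈ PySem.List.pyRange 0 w 1,
      pvP mapa n w i j = (decide (pvVal mapa i j = 1) && decide (j = 0 ∨ j = w - 1)) := by
    intro j _
    simp [pvP, hi0, hin]
  unfold pvG
  rw [List.filter_congr hpred]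
  by_cases h1w : 1 < w
  · rw [PySem.List.pyRange_one_append 0 1 w (by omega) (by omega),
        PySem.List.pyRange_one_append 1 (w - 1) w (by omega) (by omega)]
    have e1 : PySem.List.pyRange 0 1 1 = [(0 : Int)] := PySem.List.pyRange_one_singleton 0
    have e2 : PySem.List.pyRange (w - 1) w 1 = [w - 1] := by
      have := PySem.List.pyRange_one_singleton (w - 1)
      simpa using this
    rw [e1, e2]
    have emid : (PySem.List.pyRange 1 (w - 1) 1).filter
        (fun j => decide (pvVal mapa i j = 1) && decide (j = 0 ∨ j = w - 1)) = [] := by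
      rw [List.filter_eq_nil_iff]
      intro j hj
      rw [PySem.List.mem_pyRange_one] at hj
      simp
      intro _
      omega
    simp only [List.filter_append, emid, List.filter_singleton]
    unfold pvH pvVal
    split_ifs with ha hb hb <;> simp_all
  · have hw1 : w = 1 := by omega
    subst hw1
    have e0 : PySem.List.pyRange 0 1 1 = [(0 : Int)] := by
      simpa using PySem.List.pyRange_one_singleton (0 : Int)
    rw [e0]
    simp only [List.filter_singleton]
    unfold pvH pvVal
    split_ifs <;> simp_all

theorem g_last (mapa : List (List Int)) (hne : mapa ≠ []) (w0 : Nat)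
    (hlen : w0 ≤ (mapa.getLast hne).length) :
    pvG mapa (mapa.length : Int) (w0 : Int) ((mapa.length : Int) - 1)
    = ((PySem.List.enumerate
          (PySem.List.slice (PySem.List.pyGetD mapa (-1) []) none (some (w0 : Int))) 0).filter
          (fun p => p.2 == 1)).map (fun p => ((mapa.length : Int) - 1, p.1)) := by
  have hL : PySem.List.pyGetD mapa (-1) [] = mapa.getLast hne := PySem.List.pyGetD_neg_one mapa [] hne
  rw [hL, PySem.List.slice_to_natCast, comp_eq]
  have hlen2 : (((mapa.getLast hne).take w0).length : Int) = (w0 : Int) := by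
    simp; omega
  rw [hlen2]
  unfold pvG
  congr 1
  apply List.filter_congr
  intro j hj
  rw [PySem.List.mem_pyRange_one] at hj
  have h1 : pvVal mapa ((mapa.length : Int) - 1) j
      = PySem.List.pyGetD ((mapa.getLast hne).take w0) j 0 := by
    have hml : mapa.length ≠ 0 := by simpa using hne
    have hrow : PySem.List.pyGetD mapa ((mapa.length : Int) - 1) [] = mapa.getLast hne := by
      rw [PySem.List.pyGetD_eq_getElem mapa [] (by omega) (by omega)]
      rw [List.getLast_eq_getElem]
      congr 1
      omega
    unfold pvVal
    rw [hrow]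
    rw [PySem.List.pyGetD_eq_getElem (mapa.getLast hne) 0 hj.1 (by omega),
        PySem.List.pyGetD_eq_getElem ((mapa.getLast hne).take w0) 0 hj.1 (by simp; omega)]
    rw [List.getElem_take]
  simp only [pvP, h1]
  simp

theorem main (mapa : List (List Int))
    (hrows : ∀ row ∈ mapa, (mapa.headD []).length ≤ row.length) :
    find_exit_doors mapa = find_exit_doors_alt mapa := by
  obtain rfl | ⟨row0, rest, rfl⟩ : mapa = [] ∨ ∃ r t, mapa = r :: t := by
    cases mapa with
    | nil => exact Or.inl rfl
    | cons a t => exact Or.inr ⟨a, t, rfl⟩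
  · decide
  have hA : find_exit_doors (row0 :: rest)
      = (PySem.List.pyRange 0 ((row0 :: rest).length : Int) 1).flatMap
          (pvG (row0 :: rest) (row0 :: rest).length (PySem.List.pyGetD (row0 :: rest) 0 []).length) := by
    unfold find_exit_doors
    exact A_flatMap (row0 :: rest)
  rw [hA]
  by_cases hr0 : row0 = []
  · subst hr0
    unfold find_exit_doors_alt
    simp [pvG, PySem.List.pyGetD_zero_cons, PySem.List.pyRange_one_eq_nil]
  · have hw0 : 0 < row0.length := List.length_pos_iff.mpr hr0
    have hz : PySem.List.pyGetD (row0 :: rest) 0 [] = row0 := PySem.List.pyGetD_zero_cons row0 rest []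
    rw [hz]
    unfold find_exit_doors_alt
    simp only [if_neg hr0]
    by_cases h1n : (1 : Int) < ((row0 :: rest).length : Int)
    · simp only [if_pos h1n]
      rw [B_mid]
      set n : Int := ((row0 :: rest).length : Int) with hn
      have hsplit : PySem.List.pyRange 0 n 1
          = [(0 : Int)] ++ PySem.List.pyRange 1 (n - 1) 1 ++ [n - 1] := by
        rw [PySem.List.pyRange_one_append 0 1 n (by omega) (by omega),
            PySem.List.pyRange_one_append 1 (n - 1) n (by omega) (by omega)]
        have e1 : PySem.List.pyRange 0 1 1 = [(0 : Int)] := by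
          simpa using PySem.List.pyRange_one_singleton (0 : Int)
        have e2 : PySem.List.pyRange (n - 1) n 1 = [n - 1] := by
          simpa using PySem.List.pyRange_one_singleton (n - 1)
        rw [e1, e2, List.append_assoc]
      rw [hsplit]
      simp only [List.flatMap_append, List.flatMap_cons, List.flatMap_nil, List.append_nil]
      congr 1
      congr 1
      · rw [g_zero, comp_eq]
      · apply List.flatMap_congr
        intro i hi
        rw [PySem.List.mem_pyRange_one] at hi
        exact g_mid _ n _ i (by omega) (by omega) (by omega)
      · have hlast : (row0 :: rest).getLast (by simp) ∈ row0 :: rest := List.getLast_mem _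
        have hlen : row0.length ≤ ((row0 :: rest).getLast (by simp)).length := by
          simpa using hrows _ hlast
        exact g_last (row0 :: rest) (by simp) row0.length hlen
    · -- n = 1, rest = []
      have hrest : rest = [] := by
        have h := not_lt.mp h1n
        simp only [List.length_cons] at h
        push_cast at h
        exact List.length_eq_zero_iff.mp (by omega)
      subst hrest
      simp only [if_neg h1n]
      have : PySem.List.pyRange 0 (([row0].length : Int)) 1 = [(0 : Int)] := by
        simpa using PySem.List.pyRange_one_singleton (0 : Int)
      rw [this]
      simp only [List.flatMap_cons, List.flatMap_nil, List.append_nil]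
      rw [g_zero, comp_eq]

-- ===== VERDICT (by name: the statement is the Claim_ definition above) =====
theorem find_exit_doors_spec : Claim_equal_find_exit_doors := by
  intro mapa _ hpre
  unfold Spec_find_exit_doors
  exact main mapa hpre
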